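-- pv_equiv track=rewrite | github.com/atollk/aachen_aoc24 | Andreas/day7_worst_case_gen.py | collect_checks
-- ===== SOURCE A (Python) =====
-- def check(n):
--   s = str(n)
--   t1 = int(s[-1:])
--   t2 = int(s[-2:])
--   if t1 != 0 and t1 != 1 and n % t1 == 0:
--     return n//t1, int(s[:-1]), t1
--   if t2 != 0 and t2 != 1 and n % t2 == 0:
--     return n//t2, int(s[:-2]), t2
--   return n, n, 0
--
-- def collect_checks(n):
--   if n < 100:
--     return [n]
--   a, b, c = check(n)
--   if c == 0:
--     raise ValueError()
--   result = collect_checks(a)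
--   result.append(c)
--   return result
-- ===== SOURCE B (Python) =====
-- def collect_checks(n):
--     cs = []
--     while n >= 100:
--         t1 = n % 10
--         t2 = n % 100
--         if t1 > 1 and n % t1 == 0:
--             c = t1
--         elif t2 > 1 and n % t2 == 0:
--             c = t2
--         else:
--             raise ValueError()
--         cs.append(c)
--         n //= c
--     return [n] + cs[::-1]
-- ===== Notes on version B (the rewrite author's own statement) =====
-- stated objective: alternative
-- what changed: Replaces A's recursion with string conversion/slicing (str(n), s[-1:], s[-2:], int(...)) by an iterative while loop that reads the trailing divisors arithmetically (n % 10, n % 100), collects them in a list, and reverses it once at the end.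
import Mathlib
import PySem

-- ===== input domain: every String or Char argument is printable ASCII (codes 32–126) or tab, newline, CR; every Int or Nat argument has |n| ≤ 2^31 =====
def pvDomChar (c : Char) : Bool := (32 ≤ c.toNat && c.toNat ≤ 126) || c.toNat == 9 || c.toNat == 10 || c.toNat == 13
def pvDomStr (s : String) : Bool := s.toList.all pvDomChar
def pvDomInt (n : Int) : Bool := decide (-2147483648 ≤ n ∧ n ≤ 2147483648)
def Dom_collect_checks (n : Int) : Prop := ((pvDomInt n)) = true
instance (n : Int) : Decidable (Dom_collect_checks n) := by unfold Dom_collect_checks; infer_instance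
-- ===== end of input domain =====

-- B replaces A's recursion-with-string-slicing by an iterative arithmetic loop (n % 10 / n % 100
-- instead of str(n) slices) that collects the factors and reverses them once at the end; same values.

-- ===== PORT A =====

-- helper of A: check(n).  int(s[-1:]) etc. are PySem.Int.ofChars? of the slice; at every call
-- site (100 ≤ n) the slices are nonempty pure-digit strings, so int() always succeeds and the
-- `.getD 0` default is never used — exact there.
def check (n : Int) : Int × Int × Int :=
  let s := PySem.Int.toChars n
  let t1 := (PySem.Int.ofChars? (PySem.List.slice s (some (-1)) none)).getD 0
  let t2 := (PySem.Int.ofChars? (PySem.List.slice s (some (-2)) none)).getD 0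
  if t1 ≠ 0 ∧ t1 ≠ 1 ∧ PySem.Int.mod n t1 = 0 then
    (PySem.Int.floordiv n t1, (PySem.Int.ofChars? (PySem.List.slice s none (some (-1)))).getD 0, t1)
  else if t2 ≠ 0 ∧ t2 ≠ 1 ∧ PySem.Int.mod n t2 = 0 then
    (PySem.Int.floordiv n t2, (PySem.Int.ofChars? (PySem.List.slice s none (some (-2)))).getD 0, t2)
  else (n, n, 0)

-- lemmas the ports need for termination (cited in decreasing_by) --

lemma ediv_shrink (n c : Int) (h : 1 ≤ n) (hc : 1 < c) : 0 ≤ n / c ∧ n / c < n := by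
  obtain ⟨a, rfl⟩ : ∃ a : Nat, n = (a : Int) := ⟨n.toNat, by omega⟩
  obtain ⟨b, rfl⟩ : ∃ b : Nat, c = (b : Int) := ⟨c.toNat, by omega⟩
  have hd : (a : Int) / (b : Int) = ((a / b : Nat) : Int) := (Int.natCast_div a b).symm
  have := Nat.div_lt_self (show 0 < a by omega) (show 1 < b by omega)
  constructor
  · rw [hd]; exact Int.natCast_nonneg _
  · rw [hd]; exact_mod_cast this

lemma toChars_decomp (n : Int) (h : 100 ≤ n) :
    PySem.Int.toChars n =
      Nat.toDigits 10 (n.toNat / 100) ++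
        [Nat.digitChar (n.toNat / 10 % 10), Nat.digitChar (n.toNat % 10)] := by
  have hm : 100 ≤ n.toNat := by omega
  simp only [PySem.Int.toChars, if_neg (show ¬ n < 0 by omega)]
  rw [Nat.toDigits_of_base_le (by norm_num) (show 10 ≤ n.toNat by omega)]
  rw [Nat.toDigits_of_base_le (by norm_num) (show 10 ≤ n.toNat / 10 by omega)]
  rw [show n.toNat / 10 / 10 = n.toNat / 100 by omega]
  simp [List.append_assoc]

lemma ofChars_one (k : Nat) (hk : k < 10) :
    PySem.Int.ofChars? [Nat.digitChar k] = some (k : Int) := by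
  interval_cases k <;> decide

lemma ofChars_two (k1 k0 : Nat) (h1 : k1 < 10) (h0 : k0 < 10) :
    PySem.Int.ofChars? [Nat.digitChar k1, Nat.digitChar k0] = some ((10 * k1 + k0 : Nat) : Int) := by
  interval_cases k1 <;> interval_cases k0 <;> decide

lemma t1_eq (n : Int) (h : 100 ≤ n) :
    PySem.Int.ofChars? (PySem.List.slice (PySem.Int.toChars n) (some (-1)) none) = some (n % 10) := by
  rw [PySem.List.slice_from_neg_one, toChars_decomp n h]
  rw [show Nat.toDigits 10 (n.toNat / 100) ++
        [Nat.digitChar (n.toNat / 10 % 10), Nat.digitChar (n.toNat % 10)] =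
      (Nat.toDigits 10 (n.toNat / 100) ++ [Nat.digitChar (n.toNat / 10 % 10)]) ++
        [Nat.digitChar (n.toNat % 10)] by simp]
  rw [show ((Nat.toDigits 10 (n.toNat / 100) ++ [Nat.digitChar (n.toNat / 10 % 10)]) ++
        [Nat.digitChar (n.toNat % 10)]).length - 1 =
      (Nat.toDigits 10 (n.toNat / 100) ++ [Nat.digitChar (n.toNat / 10 % 10)]).length by
    simp [List.length_append]]
  rw [List.drop_left]
  rw [ofChars_one (n.toNat % 10) (by omega)]
  congr 1
  omega

lemma t2_eq (n : Int) (h : 100 ≤ n) :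
    PySem.Int.ofChars? (PySem.List.slice (PySem.Int.toChars n) (some (-2)) none) = some (n % 100) := by
  rw [PySem.List.slice_from_neg_ofNat _ 2 (by norm_num), toChars_decomp n h]
  rw [show (Nat.toDigits 10 (n.toNat / 100) ++
        [Nat.digitChar (n.toNat / 10 % 10), Nat.digitChar (n.toNat % 10)]).length - 2 =
      (Nat.toDigits 10 (n.toNat / 100)).length by simp [List.length_append]]
  rw [List.drop_left]
  rw [ofChars_two (n.toNat / 10 % 10) (n.toNat % 10) (by omega) (by omega)]
  congr 1
  omega

-- arithmetic characterisation of check for 100 ≤ n (the b component stays as its opaque term,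
-- collect_checks never uses it)
lemma check_eq_of_ge (n : Int) (h : 100 ≤ n) :
    check n =
      if 1 < n % 10 ∧ n % (n % 10) = 0 then
        (n / (n % 10),
         (PySem.Int.ofChars? (PySem.List.slice (PySem.Int.toChars n) none (some (-1)))).getD 0,
         n % 10)
      else if 1 < n % 100 ∧ n % (n % 100) = 0 then
        (n / (n % 100),
         (PySem.Int.ofChars? (PySem.List.slice (PySem.Int.toChars n) none (some (-2)))).getD 0,
         n % 100)
      else (n, n, 0) := by
  have hm10 : (0 : Int) ≤ n % 10 := Int.emod_nonneg n (by norm_num)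
  have hm100 : (0 : Int) ≤ n % 100 := Int.emod_nonneg n (by norm_num)
  have e1 : (n % 10 ≠ 0 ∧ n % 10 ≠ 1 ∧ PySem.Int.mod n (n % 10) = 0) ↔
      (1 < n % 10 ∧ n % (n % 10) = 0) := by
    constructor
    · rintro ⟨a, b, c⟩
      have hpos : (0 : Int) < n % 10 := by omega
      rw [PySem.Int.mod_eq_emod_of_pos hpos] at c
      exact ⟨by omega, c⟩
    · rintro ⟨a, c⟩
      rw [PySem.Int.mod_eq_emod_of_pos (by omega)]
      exact ⟨by omega, by omega, c⟩
  have e2 : (n % 100 ≠ 0 ∧ n % 100 ≠ 1 ∧ PySem.Int.mod n (n % 100) = 0) ↔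
      (1 < n % 100 ∧ n % (n % 100) = 0) := by
    constructor
    · rintro ⟨a, b, c⟩
      have hpos : (0 : Int) < n % 100 := by omega
      rw [PySem.Int.mod_eq_emod_of_pos hpos] at c
      exact ⟨by omega, c⟩
    · rintro ⟨a, c⟩
      rw [PySem.Int.mod_eq_emod_of_pos (by omega)]
      exact ⟨by omega, by omega, c⟩
  simp only [check, t1_eq n h, t2_eq n h, Option.getD_some, e1, e2]
  split_ifs with h1 h2
  · rw [PySem.Int.floordiv_eq_ediv_of_pos (by omega)]
  · rw [PySem.Int.floordiv_eq_ediv_of_pos (by omega)]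
  · rfl

def collect_checks (n : Int) : List Int :=
  if h : n < 100 then [n]
  else if hc : (check n).2.2 = 0 then []   -- Python: raise ValueError(); excluded by Pre_
  else collect_checks (check n).1 ++ [(check n).2.2]
termination_by n.toNat
decreasing_by
  have hb := check_eq_of_ge n (by omega)
  split_ifs at hb with h1 h2
  · rw [hb]
    have := ediv_shrink n (n % 10) (by omega) h1.1
    simp only
    omega
  · rw [hb]
    have := ediv_shrink n (n % 100) (by omega) h2.1
    simp only
    omega
  · rw [hb] at hc; simp at hc

-- ===== PORT B =====

-- the while loop of Source B: state (n, cs); returns the final (n, cs)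
def collect_checks_alt_loop (n : Int) (cs : List Int) : Int × List Int :=
  if h : n < 100 then (n, cs)
  else
    let t1 := PySem.Int.mod n 10
    let t2 := PySem.Int.mod n 100
    if h1 : 1 < t1 ∧ PySem.Int.mod n t1 = 0 then
      collect_checks_alt_loop (PySem.Int.floordiv n t1) (cs ++ [t1])
    else if h2 : 1 < t2 ∧ PySem.Int.mod n t2 = 0 then
      collect_checks_alt_loop (PySem.Int.floordiv n t2) (cs ++ [t2])
    else (n, cs)   -- Python: raise ValueError(); excluded by Pre_
termination_by n.toNat
decreasing_by
  · have ht1 : t1 = PySem.Int.mod n 10 := rfl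
    rw [ht1, PySem.Int.mod_eq_emod_of_pos (show (0:Int) < 10 by norm_num)] at h1
    have h10 : (0:Int) < n % 10 := by omega
    rw [PySem.Int.mod_eq_emod_of_pos (show (0:Int) < 10 by norm_num),
        PySem.Int.floordiv_eq_ediv_of_pos h10]
    have := ediv_shrink n (n % 10) (by omega) h1.1
    omega
  · have ht2 : t2 = PySem.Int.mod n 100 := rfl
    rw [ht2, PySem.Int.mod_eq_emod_of_pos (show (0:Int) < 100 by norm_num)] at h2
    have h100 : (0:Int) < n % 100 := by omega
    rw [PySem.Int.mod_eq_emod_of_pos (show (0:Int) < 100 by norm_num),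
        PySem.Int.floordiv_eq_ediv_of_pos h100]
    have := ediv_shrink n (n % 100) (by omega) h2.1
    omega

def collect_checks_alt (n : Int) : List Int :=
  let r := collect_checks_alt_loop n []
  [r.1] ++ r.2.reverse   -- [n] + cs[::-1]

-- ===== PRECONDITION & SPEC =====

-- pvOkGo fuel n with fuel = n.toNat decides whether the repeated trailing-digit factoring ever
-- hits a level with no admissible trailing divisor (each step divides n down, so n.toNat steps suffice)
def pvOkGo : Nat → Int → Bool
  | 0, n => decide (n < 100)
  | k + 1, n =>
    if n < 100 then true
    else if 1 < n % 10 ∧ n % (n % 10) = 0 then pvOkGo k (n / (n % 10))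
    else if 1 < n % 100 ∧ n % (n % 100) = 0 then pvOkGo k (n / (n % 100))
    else false

-- Pre_ holds exactly on the inputs where A returns normally; it excludes exactly the inputs on
-- which A (and B) raise ValueError (the factoring hits a step with no admissible trailing divisor).
-- That raising set is genuinely recursive in n (whether some level lacks a trailing divisor depends on the whole
-- chain of quotients), so no non-recursive closed form exists; pvOkGo above is stated purely
-- arithmetically on n and does not use either port. Pre_ excludes no input on which A returns.
def Pre_collect_checks (n : Int) : Prop := pvOkGo n.toNat n = true
instance (n : Int) : Decidable (Pre_collect_checks n) := by unfold Pre_collect_checks; infer_instance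

def pvWitness_collect_checks : Int := (102)

def Spec_collect_checks (n : Int) (out : List Int) : Prop := out = collect_checks_alt n
instance (n : Int) (out : List Int) : Decidable (Spec_collect_checks n out) := by unfold Spec_collect_checks; infer_instance

-- ===== CLAIM (what is proved, stated in full; the proofs are below) =====
def Claim_equal_collect_checks : Prop := ∀ (n : Int), Dom_collect_checks n → Pre_collect_checks n → Spec_collect_checks n (collect_checks n)

-- ===== LEMMAS AND PROOFS =====

lemma loop_step (n : Int) (cs : List Int) (h : 100 ≤ n) :
    collect_checks_alt_loop n cs =
      if 1 < n % 10 ∧ n % (n % 10) = 0 then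
        collect_checks_alt_loop (n / (n % 10)) (cs ++ [n % 10])
      else if 1 < n % 100 ∧ n % (n % 100) = 0 then
        collect_checks_alt_loop (n / (n % 100)) (cs ++ [n % 100])
      else (n, cs) := by
  rw [collect_checks_alt_loop]
  rw [dif_neg (show ¬ n < 100 by omega)]
  have hm10 : PySem.Int.mod n 10 = n % 10 := PySem.Int.mod_eq_emod_of_pos (by norm_num)
  have hm100 : PySem.Int.mod n 100 = n % 100 := PySem.Int.mod_eq_emod_of_pos (by norm_num)
  have h10 : (0 : Int) ≤ n % 10 := Int.emod_nonneg n (by norm_num)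
  have h100 : (0 : Int) ≤ n % 100 := Int.emod_nonneg n (by norm_num)
  simp only [hm10, hm100]
  have e1 : (1 < n % 10 ∧ PySem.Int.mod n (n % 10) = 0) ↔ (1 < n % 10 ∧ n % (n % 10) = 0) := by
    constructor
    · rintro ⟨a, c⟩; rw [PySem.Int.mod_eq_emod_of_pos (by omega)] at c; exact ⟨a, c⟩
    · rintro ⟨a, c⟩; rw [PySem.Int.mod_eq_emod_of_pos (by omega)]; exact ⟨a, c⟩
  have e2 : (1 < n % 100 ∧ PySem.Int.mod n (n % 100) = 0) ↔ (1 < n % 100 ∧ n % (n % 100) = 0) := by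
    constructor
    · rintro ⟨a, c⟩; rw [PySem.Int.mod_eq_emod_of_pos (by omega)] at c; exact ⟨a, c⟩
    · rintro ⟨a, c⟩; rw [PySem.Int.mod_eq_emod_of_pos (by omega)]; exact ⟨a, c⟩
  simp only [e1, e2]
  split_ifs with h1 h2
  · rw [PySem.Int.floordiv_eq_ediv_of_pos (by omega)]
  · rw [PySem.Int.floordiv_eq_ediv_of_pos (by omega)]
  · rfl

lemma collect_checks_step (n : Int) (h : 100 ≤ n) :
    collect_checks n =
      if 1 < n % 10 ∧ n % (n % 10) = 0 then collect_checks (n / (n % 10)) ++ [n % 10]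
      else if 1 < n % 100 ∧ n % (n % 100) = 0 then collect_checks (n / (n % 100)) ++ [n % 100]
      else [] := by
  rw [collect_checks]
  rw [dif_neg (show ¬ n < 100 by omega)]
  rw [check_eq_of_ge n h]
  split_ifs with h1 h2
  all_goals first | rfl | omega | (simp_all; omega) | (simp_all)

lemma main_go : ∀ (k : Nat) (n : Int) (cs : List Int), n.toNat ≤ k → pvOkGo k n = true →
    (collect_checks_alt_loop n cs).1 :: (collect_checks_alt_loop n cs).2.reverse =
      collect_checks n ++ cs.reverse := by
  intro k
  induction k with
  | zero =>
    intro n cs hk hok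
    have hlt : n < 100 := by
      by_contra hge
      simp [pvOkGo, hge] at hok
    rw [collect_checks_alt_loop, dif_pos hlt, collect_checks, dif_pos hlt]
    simp
  | succ k ih =>
    intro n cs hk hok
    by_cases hlt : n < 100
    · rw [collect_checks_alt_loop, dif_pos hlt, collect_checks, dif_pos hlt]
      simp
    · have hge : 100 ≤ n := by omega
      simp only [pvOkGo, if_neg hlt] at hok
      rw [loop_step n cs hge, collect_checks_step n hge]
      by_cases h1 : 1 < n % 10 ∧ n % (n % 10) = 0
      · have hb := ediv_shrink n (n % 10) (by omega) h1.1
        rw [if_pos h1] at hok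
        rw [if_pos h1, if_pos h1]
        rw [ih (n / (n % 10)) (cs ++ [n % 10]) (by omega) hok]
        simp
      · rw [if_neg h1] at hok
        rw [if_neg h1, if_neg h1]
        by_cases h2 : 1 < n % 100 ∧ n % (n % 100) = 0
        · have hb := ediv_shrink n (n % 100) (by omega) h2.1
          rw [if_pos h2] at hok
          rw [if_pos h2, if_pos h2]
          rw [ih (n / (n % 100)) (cs ++ [n % 100]) (by omega) hok]
          simp
        · rw [if_neg h2] at hok
          simp at hok

-- ===== VERDICT (by name: the statement is the Claim_ definition above) =====
theorem collect_checks_spec : Claim_equal_collect_checks := by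
  unfold Claim_equal_collect_checks
  intro n _ hpre
  unfold Spec_collect_checks
  unfold Pre_collect_checks at hpre
  have h := main_go n.toNat n [] le_rfl hpre
  simp only [List.reverse_nil, List.append_nil] at h
  unfold collect_checks_alt
  simp only [List.singleton_append]
  exact h.symm
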